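-- pv_equiv track=rewrite | github.com/pypi-data/pypi-mirror-225 | packages/autoapi-django/autoapi_django-0.11.4-py3-none-any.whl/autoapi/schema/utils.py | remove_spaces_from_begin
-- ===== SOURCE A (Python) =====
-- def remove_spaces_from_begin(s: str) -> str:
--     result = ''
--     found = False
--     for ch in s:
--         if ch == ' ' and not found:
--             continue
--         found = True
--         result += ch
--     return result
-- ===== SOURCE B (Python) =====
-- def remove_spaces_from_begin(s: str) -> str:
--     i = 0
--     while i < len(s) and s[i] == ' ':
--         i += 1
--     return s[i:]
-- ===== Notes on version B (the rewrite author's own statement) =====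
-- stated objective: simpler
-- what changed: B scans only the leading run of spaces to find its end index and returns one slice, instead of A's full pass over every character building the result by repeated string concatenation.
import Mathlib
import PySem

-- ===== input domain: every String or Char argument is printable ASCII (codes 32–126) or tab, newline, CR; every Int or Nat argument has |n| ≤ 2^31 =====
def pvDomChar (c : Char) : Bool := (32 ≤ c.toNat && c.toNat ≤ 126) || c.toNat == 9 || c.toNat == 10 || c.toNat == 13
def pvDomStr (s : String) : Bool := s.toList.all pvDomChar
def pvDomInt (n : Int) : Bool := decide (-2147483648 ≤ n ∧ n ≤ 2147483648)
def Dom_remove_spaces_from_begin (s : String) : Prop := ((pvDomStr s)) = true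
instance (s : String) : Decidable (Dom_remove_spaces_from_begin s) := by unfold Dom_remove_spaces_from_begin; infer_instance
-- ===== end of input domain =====

-- B walks only the leading run of spaces to its end index and returns one slice,
-- instead of A's full pass appending every kept character to a growing result.

-- ===== PORT A =====
-- state = (result so far, found flag); one step per character, branches as in A
def pvStepA (acc : List Char × Bool) (ch : Char) : List Char × Bool :=
  if ch = ' ' ∧ acc.2 = false then acc else (acc.1 ++ [ch], true)

def remove_spaces_from_begin (s : String) : String :=
  String.mk (s.toList.foldl pvStepA ([], false)).1

-- ===== PORT B =====
-- the `while i < len(s) and s[i] == ' '` scan: length of the leading run of spaces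
def pvLeadLen : List Char → Nat
  | [] => 0
  | c :: t => if c = ' ' then pvLeadLen t + 1 else 0

-- return s[i:]  (i is within 0..len, so the slice is the drop)
def remove_spaces_from_begin_alt (s : String) : String :=
  String.mk (s.toList.drop (pvLeadLen s.toList))

-- ===== PRECONDITION & SPEC =====
def Spec_remove_spaces_from_begin (s : String) (out : String) : Prop := out = remove_spaces_from_begin_alt s
instance (s : String) (out : String) : Decidable (Spec_remove_spaces_from_begin s out) := by unfold Spec_remove_spaces_from_begin; infer_instance

-- ===== CLAIM (what is proved, stated in full; the proofs are below) =====
def Claim_equal_remove_spaces_from_begin : Prop := ∀ (s : String), Dom_remove_spaces_from_begin s → Spec_remove_spaces_from_begin s (remove_spaces_from_begin s)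

-- ===== LEMMAS AND PROOFS =====

-- once found = true, A appends every remaining character
theorem pvFoldA_found (cs : List Char) (r : List Char) :
    cs.foldl pvStepA (r, true) = (r ++ cs, true) := by
  induction cs generalizing r with
  | nil => simp
  | cons c t ih =>
      simp only [List.foldl_cons, pvStepA]
      rw [if_neg (by simp)]
      simp [ih]

-- from the initial state, A's result is the tail after the leading spaces
theorem pvFoldA_eq_drop (cs : List Char) :
    (cs.foldl pvStepA ([], false)).1 = cs.drop (pvLeadLen cs) := by
  induction cs with
  | nil => simp [pvLeadLen]
  | cons c t ih =>
      by_cases h : c = ' '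
      · simp only [List.foldl_cons, pvStepA, h]
        rw [if_pos (by simp)]
        simpa [pvLeadLen, h] using ih
      · simp only [List.foldl_cons, pvStepA]
        rw [if_neg (by simp [h])]
        simp [pvFoldA_found, pvLeadLen, h]

-- ===== VERDICT (by name: the statement is the Claim_ definition above) =====
theorem remove_spaces_from_begin_spec : Claim_equal_remove_spaces_from_begin := by
  intro s _
  unfold Spec_remove_spaces_from_begin remove_spaces_from_begin remove_spaces_from_begin_alt
  rw [pvFoldA_eq_drop]
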